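-- pv_equiv track=rewrite | github.com/potykion/potykion.github.io | potyk_io_back/pages.py | generate_breadcrumbs
-- ===== SOURCE A (Python) =====
-- def generate_breadcrumbs(path):
--     """
--     >>> generate_breadcrumbs('/recipes/banh-mi')
--     ['/', '/recipes', '/recipes/banh-mi']
--     """
--     subpaths = ["/"]
--     current_path = ""
--     for segment in path.split("/"):
--         if segment:  # Ignore empty segments
--             current_path += "/" + segment
--             subpaths.append(current_path)
--     return subpaths
-- ===== SOURCE B (Python) =====
-- def generate_breadcrumbs(path):
--     segments = [s for s in path.split("/") if s]
--     return ["/"] + ["/" + "/".join(segments[:i + 1]) for i in range(len(segments))]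
-- ===== Notes on version B (the rewrite author's own statement) =====
-- stated objective: simpler
-- what changed: Replaces the accumulator-threading loop (a running current_path extended per segment) with a stateless prefix-slice decomposition: each breadcrumb is recomputed by joining a prefix of the precomputed non-empty segment list.
import Mathlib
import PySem

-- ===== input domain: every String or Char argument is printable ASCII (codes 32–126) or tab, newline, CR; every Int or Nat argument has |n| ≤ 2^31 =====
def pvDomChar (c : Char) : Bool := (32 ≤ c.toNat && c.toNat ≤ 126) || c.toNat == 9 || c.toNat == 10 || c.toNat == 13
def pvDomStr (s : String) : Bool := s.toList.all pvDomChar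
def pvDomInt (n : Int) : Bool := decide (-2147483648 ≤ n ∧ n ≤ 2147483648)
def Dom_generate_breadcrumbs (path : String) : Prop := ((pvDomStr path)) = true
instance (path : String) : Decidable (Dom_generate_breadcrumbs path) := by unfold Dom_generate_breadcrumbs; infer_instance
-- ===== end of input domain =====

-- B replaces A's running-accumulator loop by recomputing each breadcrumb as '/' + join of a
-- prefix slice of the precomputed non-empty segment list (objective: simpler decomposition).

-- ===== PORT A =====
-- A: fold over path.split("/") threading (subpaths, current_path)
def generate_breadcrumbs (path : String) : List String :=
  (((PySem.Str.split? path "/").getD []).foldl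
    (fun (st : List String × String) segment =>
      if segment ≠ "" then
        let current_path := st.2 ++ "/" ++ segment
        (st.1 ++ [current_path], current_path)
      else st)
    (["/"], "")).1

-- ===== PORT B =====
-- B: '/' consed onto, for each i, '/' ++ '/'.join(segments[:i+1])
def generate_breadcrumbs_alt (path : String) : List String :=
  let segments := ((PySem.Str.split? path "/").getD []).filter (fun s => s ≠ "")
  "/" :: (List.range segments.length).map
    (fun i => "/" ++ PySem.Str.join "/" (segments.take (i + 1)))

-- ===== PRECONDITION & SPEC =====
def Spec_generate_breadcrumbs (path : String) (out : List String) : Prop := out = generate_breadcrumbs_alt path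
instance (path : String) (out : List String) : Decidable (Spec_generate_breadcrumbs path out) := by unfold Spec_generate_breadcrumbs; infer_instance

-- ===== CLAIM (what is proved, stated in full; the proofs are below) =====
def Claim_equal_generate_breadcrumbs : Prop := ∀ (path : String), Dom_generate_breadcrumbs path → Spec_generate_breadcrumbs path (generate_breadcrumbs path)

-- ===== LEMMAS AND PROOFS =====

-- A's loop body, as a named step function
def pvStep (st : List String × String) (segment : String) : List String × String :=
  if segment ≠ "" then
    let current_path := st.2 ++ "/" ++ segment
    (st.1 ++ [current_path], current_path)
  else st

-- folding pvStep over l only touches the non-empty segments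
theorem pvFoldl_filter (l : List String) (st : List String × String) :
    l.foldl pvStep st = (l.filter (fun s => s ≠ "")).foldl pvStep st := by
  induction l generalizing st with
  | nil => rfl
  | cons x xs ih =>
    by_cases hx : x = ""
    · simp [hx, pvStep, List.filter, ih]
    · simp [List.foldl, List.filter, hx, ih]

-- Str-level join facts
theorem pvJoin_singleton (sep p : String) : PySem.Str.join sep [p] = p := by
  apply String.toList_injective
  simp [PySem.Str.toList_join, PySem.Chars.join_singleton]

theorem pvJoin_cons_cons (sep p q : String) (rest : List String) :
    PySem.Str.join sep (p :: q :: rest) = p ++ sep ++ PySem.Str.join sep (q :: rest) := by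
  apply String.toList_injective
  simp [PySem.Str.toList_join, PySem.Chars.join_cons_cons]

-- over a list of NON-EMPTY segments, A's fold appends exactly B's prefix-join breadcrumbs
theorem pvFoldl_join (segs : List String) (hne : ∀ s ∈ segs, s ≠ "") (acc : List String) (cur : String) :
    (segs.foldl pvStep (acc, cur)).1 =
      acc ++ (List.range segs.length).map
        (fun i => cur ++ "/" ++ PySem.Str.join "/" (segs.take (i + 1))) := by
  induction segs generalizing acc cur with
  | nil => simp
  | cons s rest ih =>
    have hs : s ≠ "" := hne s (by simp)
    have hrest : ∀ t ∈ rest, t ≠ "" := fun t ht => hne t (by simp [ht])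
    have hstep : pvStep (acc, cur) s = (acc ++ [cur ++ "/" ++ s], cur ++ "/" ++ s) := by
      simp [pvStep, hs]
    rw [List.foldl_cons, hstep, ih hrest]
    rw [List.length_cons, List.range_succ_eq_map]
    simp only [List.map_cons, List.map_map, List.append_assoc, List.singleton_append]
    congr 1
    congr 1
    · simp [pvJoin_singleton]
    apply List.map_congr_left
    intro i hi
    simp only [Function.comp, List.mem_range] at hi ⊢
    rw [List.take_succ_cons]
    rcases rest with _ | ⟨r, rs⟩
    · simp at hi
    · have h2 : (r :: rs).take (i + 1) = r :: rs.take i := by simp [List.take_succ_cons]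
      rw [h2, pvJoin_cons_cons]
      simp [String.append_assoc]

-- ===== VERDICT (by name: the statement is the Claim_ definition above) =====
theorem generate_breadcrumbs_spec : Claim_equal_generate_breadcrumbs := by
  intro path _
  unfold Spec_generate_breadcrumbs generate_breadcrumbs generate_breadcrumbs_alt
  rw [show (fun (st : List String × String) segment =>
      if segment ≠ "" then
        let current_path := st.2 ++ "/" ++ segment
        (st.1 ++ [current_path], current_path)
      else st) = pvStep from rfl]
  rw [pvFoldl_filter, pvFoldl_join _ (fun s hs => by simpa using (List.mem_filter.mp hs).2)]
  simp
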